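-- pv_equiv track=rewrite | github.com/MrHuff/F3M | prototype.py | recursive_center_coordinate
-- ===== SOURCE A (Python) =====
-- def recursive_center_coordinate(input=[], memory=[]):
--     if not input:
--         return memory
--     else:
--         cut = input.pop(0)
--         anti_cut = -1*cut
--         if not memory:
--             memory = [[cut], [anti_cut]]
--             return recursive_center_coordinate(input,memory)
--         else:
--             memory = [el+[cut] for el in memory] + [el+[anti_cut] for el in memory]
--
--             return recursive_center_coordinate(input,memory)
-- ===== SOURCE B (Python) =====
-- def recursive_center_coordinate(input=[], memory=[]):
--     # Iterative version of the same doubling strategy; like A, it empties the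
--     # caller's input list via pop(0).
--     result = memory
--     while input:
--         cut = input.pop(0)
--         anti = -cut
--         if not result:
--             result = [[cut], [anti]]
--         else:
--             result = [el + [cut] for el in result] + [el + [anti] for el in result]
--     return result
-- ===== Notes on version B (the rewrite author's own statement) =====
-- stated objective: simpler
-- what changed: Tail recursion replaced by an explicit while-loop with a result accumulator (iterative decomposition of the same doubling strategy).
import Mathlib
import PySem

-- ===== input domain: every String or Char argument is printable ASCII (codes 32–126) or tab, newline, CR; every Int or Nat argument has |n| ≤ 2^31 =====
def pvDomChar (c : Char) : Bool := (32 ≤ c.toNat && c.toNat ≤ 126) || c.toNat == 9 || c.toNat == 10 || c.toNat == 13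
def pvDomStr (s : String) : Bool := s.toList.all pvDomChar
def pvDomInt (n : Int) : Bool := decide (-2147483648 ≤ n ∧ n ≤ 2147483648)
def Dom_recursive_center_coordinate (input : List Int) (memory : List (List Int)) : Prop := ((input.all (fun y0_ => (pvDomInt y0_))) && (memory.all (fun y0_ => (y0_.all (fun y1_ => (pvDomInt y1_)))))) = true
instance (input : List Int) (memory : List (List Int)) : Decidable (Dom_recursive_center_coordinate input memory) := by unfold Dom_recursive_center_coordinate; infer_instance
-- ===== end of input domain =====

-- B: same doubling strategy written as an explicit fold/loop instead of tail recursion (simpler decomposition); return-value equivalence only — in Python both A and B empty the caller's input list via pop(0).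


-- ===== PORT A =====
def recursive_center_coordinate (input : List Int) (memory : List (List Int)) : List (List Int) :=
  match input with
  | [] => memory
  | cut :: rest =>
    let anti_cut := -1 * cut
    if memory.isEmpty then
      recursive_center_coordinate rest [[cut], [anti_cut]]
    else
      recursive_center_coordinate rest
        ((memory.map (fun el => el ++ [cut])) ++ (memory.map (fun el => el ++ [anti_cut])))

-- ===== PORT B =====
-- one loop step: pop x from the front, double (or seed) the accumulated result
def rccStep (result : List (List Int)) (x : Int) : List (List Int) :=
  let anti := -x
  if result.isEmpty then [[x], [anti]]
  else (result.map (fun el => el ++ [x])) ++ (result.map (fun el => el ++ [anti]))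

def recursive_center_coordinate_alt (input : List Int) (memory : List (List Int)) : List (List Int) :=
  input.foldl rccStep memory

-- ===== PRECONDITION & SPEC =====
def Spec_recursive_center_coordinate (input : List Int) (memory : List (List Int)) (out : List (List Int)) : Prop := out = recursive_center_coordinate_alt input memory
instance (input : List Int) (memory : List (List Int)) (out : List (List Int)) : Decidable (Spec_recursive_center_coordinate input memory out) := by unfold Spec_recursive_center_coordinate; infer_instance

-- ===== CLAIM (what is proved, stated in full; the proofs are below) =====
def Claim_equal_recursive_center_coordinate : Prop := ∀ (input : List Int) (memory : List (List Int)), Dom_recursive_center_coordinate input memory → Spec_recursive_center_coordinate input memory (recursive_center_coordinate input memory)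

-- ===== LEMMAS AND PROOFS =====

theorem rcc_eq_foldl (input : List Int) (memory : List (List Int)) :
    recursive_center_coordinate input memory = input.foldl rccStep memory := by
  induction input generalizing memory with
  | nil => simp [recursive_center_coordinate]
  | cons cut rest ih =>
    simp only [recursive_center_coordinate, List.foldl_cons, rccStep]
    by_cases h : memory.isEmpty <;> simp [h, ih]

-- ===== VERDICT (by name: the statement is the Claim_ definition above) =====
theorem recursive_center_coordinate_spec : Claim_equal_recursive_center_coordinate := by
  intro input memory _
  unfold Spec_recursive_center_coordinate recursive_center_coordinate_alt
  exact rcc_eq_foldl input memory
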